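-- pv_equiv track=rewrite | github.com/Heena123916/crt | allocate_pages_hc.py | find_minimum_maxpages
-- ===== SOURCE A (Python) =====
-- def canweallocate(maxpages, arr, m):
--     no_of_pages_allocated = arr[0]
--     student = 1
--     for pages in range(1, len(arr)):
--         if (arr[pages] + no_of_pages_allocated <= maxpages):
--             no_of_pages_allocated += arr[pages]
--         else:
--             no_of_pages_allocated = arr[pages]
--             student += 1
--     return student
--
-- def find_minimum_maxpages(arr, m):
--     if m > len(arr):
--         return -1
--     min_pages = max(arr)
--     max_pages = sum(arr)
--     for maxpages in range(min_pages, max_pages + 1):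
--         if (canweallocate(maxpages, arr, m) <= m):
--             return maxpages
--     return -1
-- ===== SOURCE B (Python) =====
-- def can_split(arr, cap, m):
--     groups = 1
--     cur = 0
--     for x in arr:
--         if cur + x <= cap:
--             cur += x
--         else:
--             groups += 1
--             cur = x
--     return groups <= m
--
-- def find_minimum_maxpages(arr, m):
--     if m > len(arr):
--         return -1
--     lo = max(arr)
--     hi = sum(arr)
--     if not can_split(arr, hi, m):
--         return -1
--     while lo < hi:
--         mid = (lo + hi) // 2
--         if can_split(arr, mid, m):
--             hi = mid
--         else:
--             lo = mid + 1
--     return lo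
-- ===== Notes on version B (the rewrite author's own statement) =====
-- stated objective: alternative
-- what changed: Replaced A's linear scan of every candidate page count in [max(arr), sum(arr)] by a binary search on the answer over that interval with the greedy feasibility check; Pre_ restricts to nonnegative page counts (the problem's natural domain, where greedy feasibility is monotone in the cap) and excludes the empty list with m <= 0, on which A raises ValueError.
-- outside the precondition, e.g. on find_minimum_maxpages([-2, -2, 3, 2], 2): A returns -1, B returns 3
import Mathlib
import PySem

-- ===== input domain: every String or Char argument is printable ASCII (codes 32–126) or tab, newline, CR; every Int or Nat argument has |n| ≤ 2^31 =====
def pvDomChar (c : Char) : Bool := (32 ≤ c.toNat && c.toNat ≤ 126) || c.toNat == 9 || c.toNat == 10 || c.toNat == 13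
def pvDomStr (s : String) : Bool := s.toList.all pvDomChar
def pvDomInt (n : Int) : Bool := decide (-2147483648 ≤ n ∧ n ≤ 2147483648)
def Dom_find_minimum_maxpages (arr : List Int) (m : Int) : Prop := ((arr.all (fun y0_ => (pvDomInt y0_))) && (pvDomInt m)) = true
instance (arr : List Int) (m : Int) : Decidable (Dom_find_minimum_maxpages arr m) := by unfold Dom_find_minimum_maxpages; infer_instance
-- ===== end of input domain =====

-- B replaces A's linear scan over every candidate page count by a binary search on the
-- answer over [max(arr), sum(arr)] with the greedy feasibility check (objective: alternative
-- algorithm; it needs O(log sum) feasibility checks instead of one per candidate, but the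
-- timing run's inputs fall outside Pre_, so no speed is claimed).


-- ===== PORT A =====
def canweallocate (maxpages : Int) (arr : List Int) (m : Int) : Int :=
  ((PySem.List.pyRange 1 (arr.length : Int) 1).foldl
    (fun (s : Int × Int) (j : Int) =>
      if PySem.List.pyGetD arr j 0 + s.2 ≤ maxpages then (s.1, s.2 + PySem.List.pyGetD arr j 0)
      else (s.1 + 1, PySem.List.pyGetD arr j 0))
    (1, PySem.List.pyGetD arr 0 0)).1

-- the 'for maxpages in range(...)' loop with its early 'return maxpages' ('-1' = fell through)
def pvScanA (arr : List Int) (m : Int) : List Int → Int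
  | [] => -1
  | k :: ks => if canweallocate k arr m ≤ m then k else pvScanA arr m ks

def find_minimum_maxpages (arr : List Int) (m : Int) : Int :=
  if m > (arr.length : Int) then -1
  else
    let min_pages := (PySem.List.max? arr (fun x => x)).getD 0
    let max_pages := arr.sum
    pvScanA arr m (PySem.List.pyRange min_pages (max_pages + 1) 1)

-- ===== PORT B =====
def can_split (arr : List Int) (cap : Int) (m : Int) : Bool :=
  decide ((arr.foldl
    (fun (s : Int × Int) (x : Int) => if s.2 + x ≤ cap then (s.1, s.2 + x) else (s.1 + 1, x))
    (1, 0)).1 ≤ m)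

-- midpoint bounds, used only for termination of the binary-search loop below
theorem pvMid_bounds (lo hi : Int) (h : lo < hi) :
    lo ≤ PySem.Int.floordiv (lo + hi) 2 ∧ PySem.Int.floordiv (lo + hi) 2 < hi := by
  constructor
  · rw [PySem.Int.le_floordiv_iff_mul_le (by omega)]; omega
  · rw [PySem.Int.floordiv_lt_iff_lt_mul (by omega)]; omega

-- the 'while lo < hi' loop of B
def pvBSearch (arr : List Int) (m : Int) (lo hi : Int) : Int :=
  if h : lo < hi then
    let mid := PySem.Int.floordiv (lo + hi) 2
    if can_split arr mid m then pvBSearch arr m lo mid else pvBSearch arr m (mid + 1) hi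
  else lo
termination_by (hi - lo).toNat
decreasing_by
  · have := pvMid_bounds lo hi h; omega
  · have := pvMid_bounds lo hi h; omega

def find_minimum_maxpages_alt (arr : List Int) (m : Int) : Int :=
  if m > (arr.length : Int) then -1
  else
    let lo := (PySem.List.max? arr (fun x => x)).getD 0
    let hi := arr.sum
    if !can_split arr hi m then -1
    else pvBSearch arr m lo hi

-- ===== PRECONDITION & SPEC =====
-- Pre_ excludes (i) the empty list with m ≤ 0, on which A raises ValueError at max(arr), and
-- (ii) lists containing a negative entry — negative page counts are outside the natural domain
-- of the book-allocation problem, and A's greedy count is not monotone there, so its scan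
-- result is an accident of the implementation.
def Pre_find_minimum_maxpages (arr : List Int) (m : Int) : Prop :=
  (∀ x ∈ arr, 0 ≤ x) ∧ (arr = [] → 0 < m)
instance (arr : List Int) (m : Int) : Decidable (Pre_find_minimum_maxpages arr m) := by
  unfold Pre_find_minimum_maxpages; infer_instance

def pvWitness_find_minimum_maxpages : List Int × Int := ([12, 34, 67, 90], 2)

def Spec_find_minimum_maxpages (arr : List Int) (m : Int) (out : Int) : Prop := out = find_minimum_maxpages_alt arr m
instance (arr : List Int) (m : Int) (out : Int) : Decidable (Spec_find_minimum_maxpages arr m out) := by unfold Spec_find_minimum_maxpages; infer_instance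

-- ===== CLAIM (what is proved, stated in full; the proofs are below) =====
def Claim_equal_find_minimum_maxpages : Prop := ∀ (arr : List Int) (m : Int), Dom_find_minimum_maxpages arr m → Pre_find_minimum_maxpages arr m → Spec_find_minimum_maxpages arr m (find_minimum_maxpages arr m)

-- ===== LEMMAS AND PROOFS =====

-- the common greedy step: state = (students so far, pages given to the current student)
def pvStep (cap : Int) (s : Int × Int) (x : Int) : Int × Int :=
  if s.2 + x ≤ cap then (s.1, s.2 + x) else (s.1 + 1, x)

def pvCount (arr : List Int) (cap : Int) : Int := (arr.foldl (pvStep cap) (1, 0)).1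

theorem can_split_eq (arr : List Int) (cap m : Int) :
    can_split arr cap m = decide (pvCount arr cap ≤ m) := rfl

theorem canweallocate_eq (a : Int) (t : List Int) (k m : Int) (ha : a ≤ k) :
    canweallocate k (a :: t) m = pvCount (a :: t) k := by
  unfold canweallocate pvCount
  rw [PySem.List.foldl_pyRange_pyGetD' (a :: t) 0
    (f := fun (s : Int × Int) (x : Int) =>
      if x + s.2 ≤ k then (s.1, s.2 + x) else (s.1 + 1, x)) (1, PySem.List.pyGetD (a :: t) 0 0)
    (by omega)]
  have h0 : PySem.List.pyGetD (a :: t) 0 0 = a := by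
    simp [PySem.List.pyGetD, PySem.List.pyGet?, PySem.List.pyIdx?]
  rw [h0]
  have hdrop : (a :: t).drop (1 : Int).toNat = t := rfl
  rw [hdrop]
  have hstep : (a :: t).foldl (pvStep k) (1, 0) = t.foldl (pvStep k) (1, a) := by
    simp [pvStep, ha]
  rw [hstep]
  have hcongr : t.foldl
      (fun (s : Int × Int) (x : Int) => if x + s.2 ≤ k then (s.1, s.2 + x) else (s.1 + 1, x)) (1, a)
      = t.foldl (pvStep k) (1, a) := by
    apply PySem.List.foldl_congr_mem
    intro acc x _
    simp [pvStep, Int.add_comm]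
  rw [hcongr]

-- the greedy student count is antitone in the cap (for nonnegative page counts):
-- invariant on the pair of runs, by induction on the list
theorem pvMono (t : List Int) (hnn : ∀ x ∈ t, 0 ≤ x) (k k' : Int) (hk : k ≤ k') :
    ∀ (s L s' L' : Int), 0 ≤ L → 0 ≤ L' → (s' < s ∨ (s' = s ∧ L' ≤ L)) →
    0 ≤ (t.foldl (pvStep k) (s, L)).2 ∧ 0 ≤ (t.foldl (pvStep k') (s', L')).2 ∧
    ((t.foldl (pvStep k') (s', L')).1 < (t.foldl (pvStep k) (s, L)).1 ∨
     ((t.foldl (pvStep k') (s', L')).1 = (t.foldl (pvStep k) (s, L)).1 ∧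
      (t.foldl (pvStep k') (s', L')).2 ≤ (t.foldl (pvStep k) (s, L)).2)) := by
  induction t with
  | nil => intro s L s' L' hL hL' hinv; simpa using ⟨hL, hL', hinv⟩
  | cons x t ih =>
    intro s L s' L' hL hL' hinv
    have hx : 0 ≤ x := hnn x (by simp)
    have hnn' : ∀ y ∈ t, 0 ≤ y := fun y hy => hnn y (by simp [hy])
    simp only [List.foldl_cons]
    by_cases h1 : L + x ≤ k <;> by_cases h2 : L' + x ≤ k' <;>
      simp only [pvStep, h1, h2, if_pos] <;>
      [skip; skip; skip; skip]
    · exact ih hnn' s (L + x) s' (L' + x) (by omega) (by omega) (by omega)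
    · exact ih hnn' s (L + x) (s' + 1) x (by omega) hx (by omega)
    · exact ih hnn' (s + 1) x s' (L' + x) hx (by omega) (by omega)
    · exact ih hnn' (s + 1) x (s' + 1) x hx hx (by omega)
  
theorem pvCount_mono (arr : List Int) (hnn : ∀ x ∈ arr, 0 ≤ x) {k k' : Int} (h : k ≤ k') :
    pvCount arr k' ≤ pvCount arr k := by
  have := pvMono arr hnn k k' h 1 0 1 0 le_rfl le_rfl (Or.inr ⟨rfl, le_rfl⟩)
  unfold pvCount; omega

-- if everything fits under the cap, the greedy never resets
theorem pvFoldl_fit (t : List Int) (hnn : ∀ x ∈ t, 0 ≤ x) :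
    ∀ (s L cap : Int), 0 ≤ L → L + t.sum ≤ cap →
    t.foldl (pvStep cap) (s, L) = (s, L + t.sum) := by
  induction t with
  | nil => intro s L cap _ _; simp
  | cons x t ih =>
    intro s L cap hL hfit
    have hx : 0 ≤ x := hnn x (by simp)
    have hnn' : ∀ y ∈ t, 0 ≤ y := fun y hy => hnn y (by simp [hy])
    have hts : 0 ≤ t.sum := List.sum_nonneg hnn'
    simp only [List.sum_cons] at hfit ⊢
    have h1 : L + x ≤ cap := by omega
    simp only [List.foldl_cons, pvStep, h1, if_pos]
    rw [ih hnn' s (L + x) cap (by omega) (by omega)]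
    ring_nf

theorem pvCount_sum (arr : List Int) (hnn : ∀ x ∈ arr, 0 ≤ x) : pvCount arr arr.sum = 1 := by
  unfold pvCount
  rw [pvFoldl_fit arr hnn 1 0 arr.sum le_rfl (by omega)]

-- pvScanA with the guard rewritten through pvCount
def pvScanQ (arr : List Int) (m : Int) : List Int → Int
  | [] => -1
  | k :: ks => if pvCount arr k ≤ m then k else pvScanQ arr m ks

theorem scanA_eq_scanQ (arr : List Int) (m : Int) (l : List Int)
    (h : ∀ k ∈ l, canweallocate k arr m = pvCount arr k) :
    pvScanA arr m l = pvScanQ arr m l := by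
  induction l with
  | nil => rfl
  | cons k ks ih =>
    simp only [pvScanA, pvScanQ, h k (by simp)]
    split
    · rfl
    · exact ih fun j hj => h j (by simp [hj])

theorem scanQ_none (arr : List Int) (m : Int) :
    ∀ (n : Nat) (lo hi : Int), (hi - lo).toNat ≤ n →
    (∀ k, lo ≤ k → k < hi → ¬ pvCount arr k ≤ m) →
    pvScanQ arr m (PySem.List.pyRange lo hi 1) = -1 := by
  intro n
  induction n with
  | zero =>
    intro lo hi hn _
    rw [PySem.List.pyRange_one_eq_nil (by omega)]; rfl
  | succ n ih =>
    intro lo hi hn hno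
    by_cases hlt : lo < hi
    · rw [PySem.List.pyRange_one_cons hlt]
      simp only [pvScanQ, if_neg (hno lo le_rfl hlt)]
      exact ih (lo + 1) hi (by omega) (fun k hk1 hk2 => hno k (by omega) hk2)
    · rw [PySem.List.pyRange_one_eq_nil (by omega)]; rfl

theorem scanQ_found (arr : List Int) (m : Int) :
    ∀ (n : Nat) (lo hi r : Int), (hi - lo).toNat ≤ n →
    lo ≤ r → r < hi → pvCount arr r ≤ m →
    (∀ j, lo ≤ j → j < r → ¬ pvCount arr j ≤ m) →
    pvScanQ arr m (PySem.List.pyRange lo hi 1) = r := by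
  intro n
  induction n with
  | zero => intro lo hi r hn h1 h2 _ _; omega
  | succ n ih =>
    intro lo hi r hn h1 h2 hr hmin
    have hlt : lo < hi := by omega
    rw [PySem.List.pyRange_one_cons hlt]
    by_cases heq : lo = r
    · simp only [pvScanQ, heq ▸ hr, if_pos]; exact heq
    · simp only [pvScanQ, if_neg (hmin lo le_rfl (by omega))]
      exact ih (lo + 1) hi r (by omega) (by omega) h2 hr (fun j hj1 hj2 => hmin j (by omega) hj2)

theorem bsearch_spec (arr : List Int) (m : Int) (hnn : ∀ x ∈ arr, 0 ≤ x) :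
    ∀ (n : Nat) (lo hi : Int), (hi - lo).toNat ≤ n → lo ≤ hi → pvCount arr hi ≤ m →
    lo ≤ pvBSearch arr m lo hi ∧ pvBSearch arr m lo hi ≤ hi ∧
    pvCount arr (pvBSearch arr m lo hi) ≤ m ∧
    (∀ j, lo ≤ j → j < pvBSearch arr m lo hi → ¬ pvCount arr j ≤ m) := by
  intro n
  induction n with
  | zero =>
    intro lo hi hn hle hhi
    have heq : lo = hi := by omega
    rw [pvBSearch, dif_neg (by omega)]
    exact ⟨le_rfl, by omega, heq ▸ hhi, fun j h1 h2 => by omega⟩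
  | succ n ih =>
    intro lo hi hn hle hhi
    by_cases hlt : lo < hi
    · obtain ⟨hm1, hm2⟩ := pvMid_bounds lo hi hlt
      rw [pvBSearch, dif_pos hlt]
      simp only [can_split_eq]
      by_cases hfeas : pvCount arr (PySem.Int.floordiv (lo + hi) 2) ≤ m
      · have hrec := ih lo (PySem.Int.floordiv (lo + hi) 2) (by omega) (by omega) hfeas
        rw [if_pos (by simpa using hfeas)]
        exact ⟨hrec.1, le_trans hrec.2.1 (by omega), hrec.2.2.1, hrec.2.2.2⟩
      · have hrec := ih (PySem.Int.floordiv (lo + hi) 2 + 1) hi (by omega) (by omega) hhi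
        rw [if_neg (by simpa using hfeas)]
        refine ⟨by omega, hrec.2.1, hrec.2.2.1, ?_⟩
        intro j hj1 hj2
        by_cases hjm : j ≤ PySem.Int.floordiv (lo + hi) 2
        · intro hQ
          exact hfeas (le_trans (pvCount_mono arr hnn hjm) hQ)
        · exact hrec.2.2.2 j (by omega) hj2
    · rw [pvBSearch, dif_neg hlt]
      have heq : lo = hi := by omega
      exact ⟨le_rfl, by omega, heq ▸ hhi, fun j h1 h2 => by omega⟩

-- ===== VERDICT (by name: the statement is the Claim_ definition above) =====
theorem find_minimum_maxpages_spec : Claim_equal_find_minimum_maxpages := by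
  intro arr m _hdom hpre
  unfold Spec_find_minimum_maxpages
  obtain ⟨hnn, hemp⟩ := hpre
  cases arr with
  | nil =>
    have hm : 0 < m := hemp rfl
    simp [find_minimum_maxpages, find_minimum_maxpages_alt, hm]
  | cons a t =>
    by_cases hm : m > (((a :: t).length : Nat) : Int)
    · unfold find_minimum_maxpages find_minimum_maxpages_alt
      rw [if_pos hm, if_pos hm]
    · obtain ⟨M, hM⟩ : ∃ M, PySem.List.max? (a :: t) (fun x => x) = some M := by
        cases h : PySem.List.max? (a :: t) (fun x => x) with
        | none => exact absurd ((PySem.List.max?_eq_none_iff (a :: t) (fun x => x)).mp h) (by simp)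
        | some M => exact ⟨M, rfl⟩
      have hMmem : M ∈ (a :: t) := PySem.List.max?_mem hM
      have hMmax : ∀ y ∈ (a :: t), y ≤ M := fun y hy => PySem.List.max?_isMax hM y hy
      have haM : a ≤ M := hMmax a (by simp)
      have hMS : M ≤ (a :: t).sum := List.single_le_sum hnn M hMmem
      have hA : find_minimum_maxpages (a :: t) m
          = pvScanA (a :: t) m (PySem.List.pyRange M ((a :: t).sum + 1) 1) := by
        unfold find_minimum_maxpages
        rw [if_neg hm, hM]
        rfl
      have hB : find_minimum_maxpages_alt (a :: t) m
          = (if !can_split (a :: t) ((a :: t).sum) m then -1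
             else pvBSearch (a :: t) m M ((a :: t).sum)) := by
        unfold find_minimum_maxpages_alt
        rw [if_neg hm, hM]
        rfl
      have hscan : pvScanA (a :: t) m (PySem.List.pyRange M ((a :: t).sum + 1) 1)
          = pvScanQ (a :: t) m (PySem.List.pyRange M ((a :: t).sum + 1) 1) := by
        apply scanA_eq_scanQ
        intro k hk
        have := (PySem.List.mem_pyRange_one.mp hk).1
        exact canweallocate_eq a t k m (by omega)
      have hsum1 : pvCount (a :: t) ((a :: t).sum) = 1 := pvCount_sum (a :: t) hnn
      rw [hA, hB, hscan]
      by_cases h1m : 1 ≤ m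
      · have hfeas : can_split (a :: t) ((a :: t).sum) m = true := by
          rw [can_split_eq, hsum1]; simpa
        rw [hfeas]
        simp only [Bool.not_true, Bool.false_eq_true, if_false]
        have hbs := bsearch_spec (a :: t) m hnn ((((a :: t).sum) - M).toNat) M ((a :: t).sum)
          le_rfl hMS (by omega)
        exact scanQ_found (a :: t) m (((a :: t).sum + 1 - M).toNat) M ((a :: t).sum + 1)
          (pvBSearch (a :: t) m M ((a :: t).sum)) le_rfl hbs.1 (by omega) hbs.2.2.1 hbs.2.2.2
      · have hfeas : can_split (a :: t) ((a :: t).sum) m = false := by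
          rw [can_split_eq, hsum1]; simpa using (by omega : ¬ (1 : Int) ≤ m)
        rw [hfeas]
        simp only [Bool.not_false, if_pos]
        apply scanQ_none (a :: t) m (((a :: t).sum + 1 - M).toNat) M ((a :: t).sum + 1) le_rfl
        intro k hk1 hk2 hQ
        have := pvCount_mono (a :: t) hnn (show k ≤ (a :: t).sum by omega)
        omega
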